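-- pv_equiv track=rewrite | github.com/mims002/School-Projects | Python/CS 112/Labs/Lab7/mmondal_213_L7.py | relocate_evens
-- ===== SOURCE A (Python) =====
-- def relocate_evens(data, new_home=None):
--
--
-- 	rdata=[]
--
-- 	if new_home==None:
-- 		new_home=[]
--
-- 	for i in range(len(data)-1,-1,-1):
-- 		if data[i]%2==0:
-- 			rdata.append(data[i])
-- 			del data[i]
--
-- 	rdata.reverse()
--
-- 	new_home.extend(rdata)
--
-- 	return new_home
-- ===== SOURCE B (Python) =====
-- def relocate_evens(data, new_home=None):
--     # One forward partition pass over the elements: evens go straight to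
--     # new_home, odds to a staging list that then replaces data's contents.
--     if new_home == None:
--         new_home = []
--     odds = []
--     for x in data:
--         if x % 2 == 0:
--             new_home.append(x)
--         else:
--             odds.append(x)
--     data[:] = odds
--     return new_home
-- ===== Notes on version B (the rewrite author's own statement) =====
-- stated objective: faster
-- what changed: Replaces A's backward index loop with per-element del (each del shifts the tail) plus a reverse buffer by one forward element-wise partition into new_home (evens) and a staging list of odds that is assigned back to data in a single slice assignment.
import Mathlib
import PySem

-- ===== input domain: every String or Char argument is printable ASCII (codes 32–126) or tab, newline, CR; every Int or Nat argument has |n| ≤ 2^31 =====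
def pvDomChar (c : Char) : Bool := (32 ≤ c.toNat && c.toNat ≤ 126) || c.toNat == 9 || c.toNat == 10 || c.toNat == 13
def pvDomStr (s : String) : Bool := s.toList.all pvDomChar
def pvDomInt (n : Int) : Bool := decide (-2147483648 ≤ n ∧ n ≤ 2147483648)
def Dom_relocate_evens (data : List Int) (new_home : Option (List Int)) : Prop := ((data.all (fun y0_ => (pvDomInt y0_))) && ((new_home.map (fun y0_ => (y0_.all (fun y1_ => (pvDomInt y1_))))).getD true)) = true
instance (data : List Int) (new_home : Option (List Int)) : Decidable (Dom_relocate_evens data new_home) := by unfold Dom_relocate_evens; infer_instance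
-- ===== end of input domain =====

-- B replaces A's backward index loop with per-element del (quadratic shifting) plus a reverse
-- buffer by one forward element-wise partition (evens to new_home, odds to a staging list put
-- back into data); in Python both leave `data` holding exactly the odds in order, and the
-- theorems are about the return value.

-- ===== PORT A =====
-- helper: one iteration of A's backward loop (state = (data, rdata))
def aStep (st : List Int × List Int) (i : Int) : List Int × List Int :=
  match PySem.List.pyGet? st.1 i with
  | none => st
  | some x =>
    if PySem.Int.mod x 2 == 0 then
      match PySem.List.pop? st.1 i with
      | some (_, d') => (d', st.2 ++ [x])
      | none => st
    else st

def relocate_evens (data : List Int) (new_home : Option (List Int)) : List Int :=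
  let nh := new_home.getD []
  let st := (PySem.List.pyRange ((data.length : Int) - 1) (-1) (-1)).foldl aStep (data, [])
  nh ++ st.2.reverse

-- ===== PORT B =====
-- helper: one iteration of B's forward partition (state = (new_home, odds))
def bStep (st : List Int × List Int) (x : Int) : List Int × List Int :=
  if PySem.Int.mod x 2 == 0 then (st.1 ++ [x], st.2) else (st.1, st.2 ++ [x])

def relocate_evens_alt (data : List Int) (new_home : Option (List Int)) : List Int :=
  let st := data.foldl bStep (new_home.getD [], [])
  st.1

-- ===== PRECONDITION & SPEC =====
def Spec_relocate_evens (data : List Int) (new_home : Option (List Int)) (out : List Int) : Prop := out = relocate_evens_alt data new_home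
instance (data : List Int) (new_home : Option (List Int)) (out : List Int) : Decidable (Spec_relocate_evens data new_home out) := by unfold Spec_relocate_evens; infer_instance

-- ===== CLAIM (what is proved, stated in full; the proofs are below) =====
def Claim_equal_relocate_evens : Prop := ∀ (data : List Int) (new_home : Option (List Int)), Dom_relocate_evens data new_home → Spec_relocate_evens data new_home (relocate_evens data new_home)

-- ===== LEMMAS AND PROOFS =====
-- helper predicate for the proofs
def pvEven (x : Int) : Bool := PySem.Int.mod x 2 == 0

theorem aStep_loop (p : List Int) : ∀ (q r : List Int),
    (PySem.List.pyRange ((p.length : Int) - 1) (-1) (-1)).foldl aStep (p ++ q, r)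
      = (p.filter (fun x => !pvEven x) ++ q, r ++ (p.filter pvEven).reverse) := by
  induction p using List.reverseRecOn with
  | nil =>
    intro q r
    rw [PySem.List.pyRange_neg_one_eq_nil (by norm_num)]
    simp
  | append_singleton p x ih =>
    intro q r
    have hlen : ((p ++ [x]).length : Int) - 1 = (p.length : Int) := by simp
    rw [hlen, PySem.List.pyRange_neg_one_cons (by omega), List.foldl_cons]
    have h1 : (p ++ [x] ++ q)[p.length]? = some x := by
      rw [List.append_assoc, List.getElem?_append_right le_rfl]; simp
    have hget : aStep (p ++ [x] ++ q, r) (p.length : Int)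
        = (if pvEven x then (p ++ q, r ++ [x]) else (p ++ [x] ++ q, r)) := by
      unfold aStep pvEven
      simp only [PySem.List.pyGet?_natCast, h1]
      have hp := PySem.List.pop?_natCast (xs := p ++ [x] ++ q) (n := p.length) (by simp)
      rw [hp]
      by_cases he : (PySem.Int.mod x 2 == 0) = true
      · rw [if_pos he, if_pos he]
        show ((p ++ [x] ++ q).eraseIdx p.length, r ++ [x]) = (p ++ q, r ++ [x])
        rw [List.append_assoc, List.eraseIdx_append_of_length_le le_rfl]
        simp
      · rw [if_neg he, if_neg he]
    rw [hget]
    by_cases he : pvEven x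
    · rw [if_pos he, ih q (r ++ [x])]
      rw [List.filter_append, List.filter_append]
      simp only [List.filter_cons, List.filter_nil, he]
      simp
    · rw [if_neg he, List.append_assoc, ih ([x] ++ q) r]
      rw [List.filter_append, List.filter_append]
      simp only [List.filter_cons, List.filter_nil, he]
      simp

theorem bStep_loop (p : List Int) : ∀ (nh odds : List Int),
    p.foldl bStep (nh, odds) = (nh ++ p.filter pvEven, odds ++ p.filter (fun x => !pvEven x)) := by
  induction p with
  | nil => intro nh odds; simp
  | cons x p ih =>
    intro nh odds
    have hb : bStep (nh, odds) x
        = if pvEven x then (nh ++ [x], odds) else (nh, odds ++ [x]) := rfl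
    rw [List.foldl_cons, hb]
    by_cases he : pvEven x
    · rw [if_pos he, ih]
      simp only [List.filter_cons, he]
      simp
    · rw [if_neg he, ih]
      simp only [List.filter_cons, he]
      simp

theorem relA (data : List Int) (new_home : Option (List Int)) :
    relocate_evens data new_home = new_home.getD [] ++ data.filter pvEven := by
  have h := aStep_loop data [] []
  simp only [List.append_nil, List.nil_append] at h
  simp [relocate_evens, h]

theorem relB (data : List Int) (new_home : Option (List Int)) :
    relocate_evens_alt data new_home = new_home.getD [] ++ data.filter pvEven := by
  rw [relocate_evens_alt, bStep_loop]

-- ===== VERDICT (by name: the statement is the Claim_ definition above) =====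
theorem relocate_evens_spec : Claim_equal_relocate_evens := by
  intro data new_home _
  unfold Spec_relocate_evens
  rw [relA, relB]
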